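-- pv_equiv track=rewrite | github.com/oschlepphorst/python-practice | friends.py | solve
-- ===== SOURCE A (Python) =====
-- def solve(n, friends):
--     allfriends = []
--     for i in range(len(friends)):
--         for j in range(len(friends[i])):
--             allfriends.append(friends[i][j])
--     out = True
--     for x in range(n):
--         if(x not in allfriends):
--             out = False
--     return out
-- ===== SOURCE B (Python) =====
-- def solve(n, friends):
--     covered = set()
--     for group in friends:
--         for v in group:
--             if 0 <= v < n:
--                 covered.add(v)
--     return len(covered) >= n
-- ===== Notes on version B (the rewrite author's own statement) =====
-- stated objective: faster
-- what changed: Instead of A's membership scan of the concatenated friend list for every target in range(n), B collects the distinct in-range values into a set in one pass and decides coverage by comparing that set's cardinality with n (pigeonhole).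
import Mathlib
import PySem

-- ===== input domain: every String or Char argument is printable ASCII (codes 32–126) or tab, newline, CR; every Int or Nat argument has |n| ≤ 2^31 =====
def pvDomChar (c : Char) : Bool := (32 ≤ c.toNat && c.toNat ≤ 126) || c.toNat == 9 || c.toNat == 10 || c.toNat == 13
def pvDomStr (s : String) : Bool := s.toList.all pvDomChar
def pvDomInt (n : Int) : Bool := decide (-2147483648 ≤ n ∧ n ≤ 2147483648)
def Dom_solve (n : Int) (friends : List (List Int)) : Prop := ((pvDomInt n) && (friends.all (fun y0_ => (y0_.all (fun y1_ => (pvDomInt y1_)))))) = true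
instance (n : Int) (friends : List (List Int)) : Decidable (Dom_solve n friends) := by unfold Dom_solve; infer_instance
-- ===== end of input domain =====

-- B counts the DISTINCT in-range values with a set and compares that count to n (pigeonhole),
-- instead of A's linear membership scan of the concatenated list for every target in range(n).

-- ===== PORT A =====
-- allfriends built by appending each friends[i][j]; then out flips to False for each x in range(n) missing
def solve (n : Int) (friends : List (List Int)) : Bool :=
  let allfriends : List Int :=
    friends.foldl (fun acc g => g.foldl (fun acc2 v => acc2 ++ [v]) acc) []
  (PySem.List.pyRange 0 n 1).foldl
    (fun out x => if ¬ (x ∈ allfriends) then false else out) true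

-- ===== PORT B =====
-- covered = set(); nested loop adds each in-range value; return len(covered) >= n
def solve_alt (n : Int) (friends : List (List Int)) : Bool :=
  let covered : PySem.Set Int :=
    friends.foldl
      (fun s g => g.foldl (fun s v => if 0 ≤ v ∧ v < n then PySem.Set.add s v else s) s)
      PySem.Set.empty
  decide (n ≤ (covered.length : Int))

-- ===== PRECONDITION & SPEC =====
def Spec_solve (n : Int) (friends : List (List Int)) (out : Bool) : Prop := out = solve_alt n friends
instance (n : Int) (friends : List (List Int)) (out : Bool) : Decidable (Spec_solve n friends out) := by unfold Spec_solve; infer_instance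

-- ===== CLAIM (what is proved, stated in full; the proofs are below) =====
def Claim_equal_solve : Prop := ∀ (n : Int) (friends : List (List Int)), Dom_solve n friends → Spec_solve n friends (solve n friends)

-- ===== LEMMAS AND PROOFS =====

theorem pv_foldl_app (g acc : List Int) :
    g.foldl (fun a v => a ++ [v]) acc = acc ++ g := by
  induction g generalizing acc with
  | nil => simp
  | cons v g ih => simp [ih]

theorem pv_allfriends_eq (friends : List (List Int)) :
    friends.foldl (fun acc g => g.foldl (fun acc2 v => acc2 ++ [v]) acc) [] = friends.flatten := by
  suffices h : ∀ acc, friends.foldl (fun acc g => g.foldl (fun acc2 v => acc2 ++ [v]) acc) acc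
      = acc ++ friends.flatten by simpa using h []
  induction friends with
  | nil => simp
  | cons g gs ih =>
    intro acc
    rw [List.foldl_cons, pv_foldl_app, ih, List.flatten_cons, List.append_assoc]

theorem pv_foldl_out (L xs : List Int) (b : Bool) :
    xs.foldl (fun out x => if ¬ (x ∈ L) then false else out) b
      = (b && xs.all (fun x => decide (x ∈ L))) := by
  induction xs generalizing b with
  | nil => simp
  | cons x xs ih =>
    rw [List.foldl_cons, ih, List.all_cons]
    by_cases h : x ∈ L <;> simp [h]

-- the guarded add-loop is Set.update with the filtered list
theorem pv_guard_fold (n : Int) (xs : List Int) :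
    ∀ (s : PySem.Set Int),
      xs.foldl (fun s v => if 0 ≤ v ∧ v < n then PySem.Set.add s v else s) s
        = PySem.Set.update s (xs.filter (fun v => decide (0 ≤ v ∧ v < n))) := by
  induction xs with
  | nil => intro s; simp [PySem.Set.update]
  | cons v vs ih =>
    intro s
    rw [List.foldl_cons]
    by_cases h : 0 ≤ v ∧ v < n
    · simp only [if_pos h, ih]
      rw [List.filter_cons_of_pos (by simpa using h)]
      simp [PySem.Set.update]
    · simp only [if_neg h, ih]
      rw [List.filter_cons_of_neg (by simpa using h)]

theorem pv_covered_eq (n : Int) (friends : List (List Int)) :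
    friends.foldl
      (fun s g => g.foldl (fun s v => if 0 ≤ v ∧ v < n then PySem.Set.add s v else s) s)
      PySem.Set.empty
      = PySem.Set.ofList (friends.flatten.filter (fun v => decide (0 ≤ v ∧ v < n))) := by
  suffices h : ∀ s, friends.foldl
      (fun s g => g.foldl (fun s v => if 0 ≤ v ∧ v < n then PySem.Set.add s v else s) s) s
      = PySem.Set.update s (friends.flatten.filter (fun v => decide (0 ≤ v ∧ v < n))) by
    rw [h]; exact PySem.Set.update_nil_left _
  induction friends with
  | nil => intro s; simp [PySem.Set.update]
  | cons g gs ih =>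
    intro s
    rw [List.foldl_cons, pv_guard_fold, ih, List.flatten_cons, List.filter_append]
    simp [PySem.Set.update, List.foldl_append]

-- ===== VERDICT (by name: the statement is the Claim_ definition above) =====
theorem solve_spec : Claim_equal_solve := by
  intro n friends _
  unfold Spec_solve solve solve_alt
  simp only [pv_allfriends_eq, pv_foldl_out, Bool.true_and, pv_covered_eq]
  set P : Int → Bool := fun v => decide (0 ≤ v ∧ v < n) with hP
  set C : List Int := PySem.Set.ofList (friends.flatten.filter P) with hC
  have hnodup : C.Nodup := PySem.Set.nodup_ofList _
  have hmem : ∀ x : Int, x ∈ C ↔ (x ∈ friends.flatten ∧ 0 ≤ x ∧ x < n) := by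
    intro x
    rw [hC, PySem.Set.mem_ofList, List.mem_filter, hP]
    simp
  have hsub : C.toFinset ⊆ Finset.Ico (0 : Int) n := by
    intro x hx
    rw [List.mem_toFinset, hmem] at hx
    rw [Finset.mem_Ico]
    exact ⟨hx.2.1, hx.2.2⟩
  have hcard : C.toFinset.card = C.length := List.toFinset_card_of_nodup hnodup
  have hIco : (Finset.Ico (0 : Int) n).card = n.toNat := by
    rw [Int.card_Ico]; simp
  rw [Bool.eq_iff_iff, List.all_eq_true, decide_eq_true_iff]
  constructor
  · intro hA
    have hsub2 : Finset.Ico (0 : Int) n ⊆ C.toFinset := by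
      intro x hx
      rw [Finset.mem_Ico] at hx
      have hxf := hA x (by rw [PySem.List.mem_pyRange_one]; omega)
      rw [decide_eq_true_iff] at hxf
      rw [List.mem_toFinset, hmem]
      exact ⟨hxf, hx.1, hx.2⟩
    have := Finset.card_le_card hsub2
    omega
  · intro hB x hx
    rw [PySem.List.mem_pyRange_one] at hx
    have heq : C.toFinset = Finset.Ico (0 : Int) n := by
      apply Finset.eq_of_subset_of_card_le hsub
      omega
    have hxC : x ∈ C := by
      rw [← List.mem_toFinset, heq, Finset.mem_Ico]; omega
    rw [hmem] at hxC
    simpa using hxC.1
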